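-- pv_equiv track=rewrite | github.com/Abdul-Mukeet/JOB_Hunting-Agent | app.py | generate_project_mapping
-- ===== SOURCE A (Python) =====
-- def generate_project_mapping(resume_text: str, job_skills: list[str]) -> str:
--     """Map resume project lines to job skills they likely support."""
--     out = "Project-to-JD Mapping\n=====================\n\n"
--     projects: list[str] = []
--     capture = False
--     for line in resume_text.splitlines():
--         stripped = line.strip()
--         if stripped.upper().startswith("PROJECT"):
--             capture = True
--             continue
--         if capture:
--             if stripped and stripped.isupper() and len(stripped) > 3:
--                 break
--             if stripped:
--                 projects.append(stripped)
--
--     if not projects: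
--         return out + "(No 'PROJECTS' section detected in resume.)\n"
--
--     for proj in projects:
--         proj_lower = proj.lower()
--         supports = [s for s in job_skills if s in proj_lower]
--         if supports:
--             out += f"- {proj}\n    Supports JD skills: {', '.join(supports)}\n"
--         else:
--             out += f"- {proj}\n    (Consider rewriting to highlight JD keywords.)\n"
--     return out
-- ===== SOURCE B (Python) =====
-- def _first_index(pred, items):
--     for i, x in enumerate(items):
--         if pred(x):
--             return i
--     return None
--
--
-- def generate_project_mapping(resume_text: str, job_skills: list[str]) -> str:
--     head = "Project-to-JD Mapping\n=====================\n\n"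
--     msg = "(No 'PROJECTS' section detected in resume.)\n"
--     lines = [ln.strip() for ln in resume_text.splitlines()]
--     h = _first_index(lambda s: s.upper().startswith("PROJECT"), lines)
--     if h is None:
--         return head + msg
--     body = lines[h + 1:]
--     t = _first_index(lambda s: not s.upper().startswith("PROJECT")
--                      and s.isupper() and len(s) > 3, body)
--     section = body if t is None else body[:t]
--     projects = [s for s in section if s and not s.upper().startswith("PROJECT")]
--     if not projects:
--         return head + msg
--     entries = []
--     for p in projects:
--         low = p.lower()
--         supports = [s for s in job_skills if s in low]
--         detail = ("Supports JD skills: " + ", ".join(supports)) if supports \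
--             else "(Consider rewriting to highlight JD keywords.)"
--         entries.append("- " + p + "\n    " + detail + "\n")
--     return head + "".join(entries)
-- ===== Notes on version B (the rewrite author's own statement) =====
-- stated objective: alternative
-- what changed: A's single stateful scan with a capture flag and break is replaced by staged passes: find the header index, slice off the body, find the terminator index, slice-and-filter the section; the += output loop becomes a joined list of per-project entries.
import Mathlib
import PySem

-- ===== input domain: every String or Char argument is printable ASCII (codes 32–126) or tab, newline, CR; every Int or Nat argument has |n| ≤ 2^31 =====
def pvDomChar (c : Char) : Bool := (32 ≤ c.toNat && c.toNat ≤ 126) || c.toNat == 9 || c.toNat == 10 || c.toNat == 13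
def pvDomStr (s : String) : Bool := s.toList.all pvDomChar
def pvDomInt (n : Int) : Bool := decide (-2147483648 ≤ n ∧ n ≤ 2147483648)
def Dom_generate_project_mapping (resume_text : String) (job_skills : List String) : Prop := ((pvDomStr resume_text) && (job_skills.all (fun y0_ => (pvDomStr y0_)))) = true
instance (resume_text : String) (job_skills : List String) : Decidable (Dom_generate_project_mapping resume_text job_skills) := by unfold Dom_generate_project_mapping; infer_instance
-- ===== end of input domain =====

-- B replaces A's stateful capture-flag scan by staged passes (find header index, slice, find terminator index, slice, filter) and the += loop by a join of entries; same cost, alternative structure.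

-- ===== PORT A =====

-- Python str.isupper(); exact on the printable-ASCII + tab/newline/CR domain, where the
-- cased characters are exactly the letters: some uppercase letter and no lowercase letter.
def pyStrIsupper (s : String) : Bool :=
  s.toList.any PySem.Chars.isupper && !(s.toList.any PySem.Chars.islower)

-- the 'for line in resume_text.splitlines()' loop, carrying the 'capture' flag; 'break' returns early
def aLoop (capture : Bool) : List String → List String
  | [] => []
  | line :: rest =>
    let stripped := PySem.Str.strip line
    if PySem.Str.startswith (PySem.Str.upper stripped) "PROJECT" then
      aLoop true rest
    else if capture then
      if stripped ≠ "" && pyStrIsupper stripped && PySem.Str.len stripped > 3 then []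
      else if stripped ≠ "" then stripped :: aLoop capture rest
      else aLoop capture rest
    else aLoop capture rest

def generate_project_mapping (resume_text : String) (job_skills : List String) : String :=
  let out := "Project-to-JD Mapping\n=====================\n\n"
  let projects := aLoop false (PySem.Str.splitlines resume_text)
  if projects = [] then
    out ++ "(No 'PROJECTS' section detected in resume.)\n"
  else
    projects.foldl (fun out proj =>
      let proj_lower := PySem.Str.lower proj
      let supports := job_skills.filter (fun s => PySem.Str.isIn s proj_lower)
      if supports ≠ [] then
        out ++ ("- " ++ proj ++ "\n    Supports JD skills: " ++ PySem.Str.join ", " supports ++ "\n")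
      else
        out ++ ("- " ++ proj ++ "\n    (Consider rewriting to highlight JD keywords.)\n")) out

-- ===== PORT B =====

def bIsHdr (s : String) : Bool := PySem.Str.startswith (PySem.Str.upper s) "PROJECT"

def bIsStop (s : String) : Bool := !bIsHdr s && pyStrIsupper s && PySem.Str.len s > 3

-- _first_index(pred, items): index of the first element satisfying pred, None if there is none
-- (= List.findIdx?, the standard-library counterpart of Source B's enumerate scan)

def bEntry (job_skills : List String) (p : String) : String :=
  let low := PySem.Str.lower p
  let supports := job_skills.filter (fun s => PySem.Str.isIn s low)
  let detail := if supports ≠ [] then "Supports JD skills: " ++ PySem.Str.join ", " supports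
                else "(Consider rewriting to highlight JD keywords.)"
  "- " ++ p ++ "\n    " ++ detail ++ "\n"

def generate_project_mapping_alt (resume_text : String) (job_skills : List String) : String :=
  let head := "Project-to-JD Mapping\n=====================\n\n"
  let msg := "(No 'PROJECTS' section detected in resume.)\n"
  let lines := (PySem.Str.splitlines resume_text).map PySem.Str.strip
  match lines.findIdx? bIsHdr with
  | none => head ++ msg
  | some h =>
    let body := PySem.List.slice lines (some ((h : Int) + 1)) none          -- lines[h+1:]
    let section_ := match body.findIdx? bIsStop with
      | none => body
      | some t => PySem.List.slice body none (some (t : Int))               -- body[:t]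
    let projects := section_.filter (fun s => s ≠ "" && !bIsHdr s)
    if projects = [] then head ++ msg
    else
      let entries := projects.foldl (fun es p => es ++ [bEntry job_skills p]) []
      head ++ PySem.Str.join "" entries

-- ===== PRECONDITION & SPEC =====
def Spec_generate_project_mapping (resume_text : String) (job_skills : List String) (out : String) : Prop := out = generate_project_mapping_alt resume_text job_skills
instance (resume_text : String) (job_skills : List String) (out : String) : Decidable (Spec_generate_project_mapping resume_text job_skills out) := by unfold Spec_generate_project_mapping; infer_instance

-- ===== CLAIM (what is proved, stated in full; the proofs are below) =====
def Claim_equal_generate_project_mapping : Prop := ∀ (resume_text : String) (job_skills : List String), Dom_generate_project_mapping resume_text job_skills → Spec_generate_project_mapping resume_text job_skills (generate_project_mapping resume_text job_skills)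

-- ===== LEMMAS AND PROOFS =====

-- proof-side restatement of A's scan over the ALREADY-STRIPPED lines: search phase …
def aFindS : List String → List String
  | [] => []
  | s :: rest => if bIsHdr s then aCollS rest else aFindS rest
-- … and capture phase
where aCollS : List String → List String
  | [] => []
  | s :: rest =>
    if bIsHdr s then aCollS rest
    else if s ≠ "" && pyStrIsupper s && PySem.Str.len s > 3 then []
    else if s ≠ "" then s :: aCollS rest
    else aCollS rest

theorem break_cond_eq (s : String) :
    (decide (s ≠ "") && pyStrIsupper s && decide (PySem.Str.len s > 3)) =
      (pyStrIsupper s && decide (PySem.Str.len s > 3)) := by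
  by_cases h : s = ""
  · subst h; simp [pyStrIsupper]
  · simp [h]

theorem aLoop_true_eq (ls : List String) :
    aLoop true ls = aFindS.aCollS (ls.map PySem.Str.strip) := by
  induction ls with
  | nil => rfl
  | cons l rest ih =>
    simp only [aLoop, aFindS.aCollS, List.map, bIsHdr, reduceIte]
    split_ifs <;> simp_all

theorem aLoop_false_eq (ls : List String) :
    aLoop false ls = aFindS (ls.map PySem.Str.strip) := by
  induction ls with
  | nil => rfl
  | cons l rest ih =>
    simp only [aLoop, aFindS, List.map, bIsHdr]
    split_ifs <;> simp_all [aLoop_true_eq]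

theorem aCollS_eq_takeWhile_filter (ls : List String) :
    aFindS.aCollS ls = (ls.takeWhile (fun s => !bIsStop s)).filter (fun s => s ≠ "" && !bIsHdr s) := by
  induction ls with
  | nil => rfl
  | cons s rest ih =>
    simp only [aFindS.aCollS, List.takeWhile_cons]
    rw [break_cond_eq]
    by_cases hh : bIsHdr s = true
    · have h1 : bIsStop s = false := by simp [bIsStop, hh]
      simp [hh, h1, ih]
    · by_cases hst : (pyStrIsupper s && decide (PySem.Str.len s > 3)) = true
      · have h1 : bIsStop s = true := by
          cases hu : pyStrIsupper s <;> cases hd : decide (PySem.Str.len s > 3) <;>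
            simp_all [bIsStop]
        rw [if_neg (by simp [hh]), if_pos hst, h1]
        simp
      · have h1 : bIsStop s = false := by
          cases hu : pyStrIsupper s <;> cases hd : decide (PySem.Str.len s > 3) <;>
            simp_all [bIsStop] <;> omega
        rw [if_neg (by simp [hh]), if_neg hst, h1]
        by_cases he : s = ""
        · subst he; simp [ih]
        · simp [he, hh, ih]

theorem aFindS_none (ls : List String) (h : ls.findIdx? bIsHdr = none) :
    aFindS ls = [] := by
  induction ls with
  | nil => rfl
  | cons s rest ih =>
    rw [List.findIdx?_cons] at h
    by_cases hs : bIsHdr s = true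
    · rw [if_pos hs] at h; exact absurd h (by simp)
    · rw [if_neg hs] at h
      have h' : rest.findIdx? bIsHdr = none := by
        cases hr : rest.findIdx? bIsHdr with
        | none => rfl
        | some k => rw [hr] at h; simp at h
      simp [aFindS, hs, ih h']

theorem aFindS_some (ls : List String) (h : Nat) (hf : ls.findIdx? bIsHdr = some h) :
    aFindS ls = aFindS.aCollS (ls.drop (h + 1)) := by
  induction ls generalizing h with
  | nil => simp at hf
  | cons s rest ih =>
    rw [List.findIdx?_cons] at hf
    by_cases hs : bIsHdr s = true
    · simp [hs] at hf
      subst hf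
      simp [aFindS, hs]
    · simp [hs] at hf
      obtain ⟨h', hf', rfl⟩ := hf
      simp [aFindS, hs, ih h' hf', List.drop]

theorem take_findIdx_eq_takeWhile (p : String → Bool) (ls : List String) :
    (match ls.findIdx? p with
      | none => ls
      | some t => ls.take t) = ls.takeWhile (fun s => !p s) := by
  induction ls with
  | nil => rfl
  | cons s rest ih =>
    rw [List.findIdx?_cons]
    by_cases hs : p s = true
    · simp [hs, List.takeWhile]
    · simp only [hs, if_neg, Bool.not_eq_true]
      simp only [List.takeWhile, hs, Bool.not_false]
      rw [← ih]
      cases hr : rest.findIdx? p <;> simp [List.take]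

theorem join_empty_cons (p : String) (ps : List String) :
    PySem.Str.join "" (p :: ps) = p ++ PySem.Str.join "" ps := by
  cases ps with
  | nil => simp [PySem.Str.join, PySem.Chars.join, List.intercalate]
  | cons q qs =>
    apply String.toList_injective
    simp [PySem.Str.join, PySem.Chars.join_cons_cons]

theorem foldl_eq_join (job_skills : List String) (ps : List String) (acc : String) :
    ps.foldl (fun out proj =>
      let proj_lower := PySem.Str.lower proj
      let supports := job_skills.filter (fun s => PySem.Str.isIn s proj_lower)
      if supports ≠ [] then
        out ++ ("- " ++ proj ++ "\n    Supports JD skills: " ++ PySem.Str.join ", " supports ++ "\n")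
      else
        out ++ ("- " ++ proj ++ "\n    (Consider rewriting to highlight JD keywords.)\n")) acc
    = acc ++ PySem.Str.join "" (ps.map (bEntry job_skills)) := by
  induction ps generalizing acc with
  | nil => simp [PySem.Str.join, PySem.Chars.join, List.intercalate]
  | cons p rest ih =>
    simp only [List.foldl, List.map, ih, join_empty_cons, bEntry]
    split_ifs with h <;> (apply String.toList_injective; simp)

-- B's projects list equals A's scan result
theorem projects_eq (ls : List String) :
    aFindS ls =
      (match ls.findIdx? bIsHdr with
        | none => ([] : List String)
        | some h =>
          let body := PySem.List.slice ls (some ((h : Int) + 1)) none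
          let section_ := match body.findIdx? bIsStop with
            | none => body
            | some t => PySem.List.slice body none (some (t : Int))
          section_.filter (fun s => s ≠ "" && !bIsHdr s)) := by
  cases hf : ls.findIdx? bIsHdr with
  | none => simpa using aFindS_none ls hf
  | some h =>
    rw [aFindS_some ls h hf, aCollS_eq_takeWhile_filter]
    have hb : PySem.List.slice ls (some ((h : Int) + 1)) none = ls.drop (h + 1) := by
      have : ((h : Int) + 1) = ((h + 1 : Nat) : Int) := by push_cast; ring
      rw [this, PySem.List.slice_from_natCast]
    simp only [hb]
    congr 1
    cases ht : (ls.drop (h + 1)).findIdx? bIsStop with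
    | none => simpa [ht] using (take_findIdx_eq_takeWhile bIsStop (ls.drop (h + 1))).symm
    | some t =>
      have := take_findIdx_eq_takeWhile bIsStop (ls.drop (h + 1))
      rw [ht] at this
      simpa [PySem.List.slice_to_natCast] using this.symm

-- ===== VERDICT (by name: the statement is the Claim_ definition above) =====
theorem generate_project_mapping_spec : Claim_equal_generate_project_mapping := by
  intro resume_text job_skills _
  unfold Spec_generate_project_mapping generate_project_mapping generate_project_mapping_alt
  rw [aLoop_false_eq, projects_eq]
  cases hf : ((PySem.Str.splitlines resume_text).map PySem.Str.strip).findIdx? bIsHdr with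
  | none => simp [hf]
  | some h =>
    simp only [hf]
    rw [PySem.List.foldl_append_singleton_eq_map]
    split_ifs with hp
    · rfl
    · rw [foldl_eq_join, List.nil_append]
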